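-- pv_equiv track=rewrite | github.com/SuppaPuppaZi/Python_Tasks | task3.py | find_letters
-- ===== SOURCE A (Python) =====
-- def find_letters(words):
--
-- 	res = []
-- 	letters = set()
-- 	letter_checker = False
-- 	double_letter = ' '
-- 	double_checker = 1
--
-- 	for word in words:
-- 		if double_letter in word or double_letter == ' ':
-- 			if word.count(double_letter) == 2 or double_letter == ' ':
-- 				double_checker *= 1
-- 			else:
-- 				double_checker *= 0
--
-- 		for letter in word:
-- 			if word.count(letter) == 2 and double_letter == ' ':
-- 				double_letter = letter
-- 			letters.add(letter)
--
--
-- 	if double_checker: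
-- 		res.append(double_letter)
--
--
-- 	for letter in letters:
-- 		for word in words:
-- 			letter_checker = True if letter in word else False
--
-- 			if not letter_checker:
-- 				break
--
-- 		if letter_checker:
-- 			res.append(letter)
--
--
-- 	return sorted(res)
-- ===== SOURCE B (Python) =====
-- def find_letters(words):
--     # phase 1: find the first non-space letter that occurs exactly twice in its word,
--     # then verify every *later* word containing it has it exactly twice
--     double_letter, tail = ' ', []
--     for i, w in enumerate(words):
--         c = next((c for c in w if c != ' ' and w.count(c) == 2), None)
--         if c is not None:
--             double_letter, tail = c, words[i + 1:]
--             break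
--     ok = all(w.count(double_letter) == 2 for w in tail if double_letter in w)
--     # phase 2: one counting pass — in how many words does each letter occur?
--     counts = {}
--     for w in words:
--         for c in dict.fromkeys(w):
--             counts[c] = counts.get(c, 0) + 1
--     res = [double_letter] if ok else []
--     res += [c for c in counts if counts[c] == len(words)]
--     return sorted(res)
-- ===== Notes on version B (the rewrite author's own statement) =====
-- stated objective: alternative
-- what changed: Phase 2's per-letter rescan of every word is replaced by a single counting pass (a dict mapping each letter to the number of words containing it; kept letters are those whose count equals len(words)), and phase 1's threaded multiplicative double_checker is replaced by an early-exit search for the first doubled letter plus one check over the words after it.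
import Mathlib
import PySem

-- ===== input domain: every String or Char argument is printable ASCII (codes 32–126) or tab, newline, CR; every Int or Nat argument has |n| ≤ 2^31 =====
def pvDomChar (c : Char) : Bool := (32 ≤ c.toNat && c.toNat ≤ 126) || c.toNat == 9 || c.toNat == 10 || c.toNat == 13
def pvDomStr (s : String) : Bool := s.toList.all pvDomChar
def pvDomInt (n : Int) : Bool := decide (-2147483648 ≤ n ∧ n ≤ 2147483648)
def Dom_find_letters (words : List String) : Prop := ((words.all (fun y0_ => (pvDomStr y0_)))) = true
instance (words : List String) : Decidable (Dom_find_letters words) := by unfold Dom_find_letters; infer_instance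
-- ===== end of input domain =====

-- B replaces A's per-letter rescan of all words by one counting pass (how many words
-- contain each letter) and A's threaded multiplicative checker by an early-exit search
-- plus a suffix check; objective: alternative (a genuinely different decomposition).
-- Both ports sort the single characters directly: Python's sorted on one-character
-- ASCII strings is exactly the code-point order on the characters.

-- ===== PORT A =====
-- one iteration of A's main 'for word in words' loop, state (double_letter, double_checker, letters)
def pvA_step (st : Char × Int × PySem.Set Char) (word : String) : Char × Int × PySem.Set Char :=
  let wl := word.toList
  let dc : Int :=
    if wl.contains st.1 || st.1 == ' ' then
      if wl.count st.1 == 2 || st.1 == ' ' then st.2.1 * 1 else st.2.1 * 0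
    else st.2.1
  let p := wl.foldl (fun (p : Char × PySem.Set Char) letter =>
      (if wl.count letter == 2 && p.1 == ' ' then letter else p.1,
       PySem.Set.add p.2 letter)) (st.1, st.2.2)
  (p.1, dc, p.2)

-- A's inner 'for word in words: … break' loop of phase 2, carrying letter_checker
def pvA_check (letter : Char) : List String → Bool → Bool
  | [], lc => lc
  | w :: ws, _ => if w.toList.contains letter then pvA_check letter ws true else false

def find_letters (words : List String) : List String :=
  let st := words.foldl pvA_step (' ', (1 : Int), PySem.Set.empty)
  let res0 : List Char := if st.2.1 ≠ 0 then [st.1] else []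
  let q := st.2.2.foldl (fun (q : Bool × List Char) letter =>
      let lc := pvA_check letter words q.1
      (lc, if lc then q.2 ++ [letter] else q.2)) (false, res0)
  (PySem.List.sorted q.2 (fun c => c) false).map (fun c => String.ofList [c])

-- ===== PORT B =====
-- first character c of wl with c != ' ' and wl.count(c) == 2 (the genexp with next(…))
def pvB_firstDouble (wl : List Char) : List Char → Option Char
  | [] => none
  | c :: rest => if c != ' ' && wl.count c == 2 then some c else pvB_firstDouble wl rest

-- B's phase-1 loop with break: the double letter and the words after the word that set it
def pvB_find : List String → Char × List String
  | [] => (' ', [])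
  | w :: rest =>
    match pvB_firstDouble w.toList w.toList with
    | some c => (c, rest)
    | none => pvB_find rest

-- one word of B's counting pass: counts[c] = counts.get(c, 0) + 1 for c in dict.fromkeys(w)
def pvB_countStep (d : PySem.Dict Char Int) (w : String) : PySem.Dict Char Int :=
  (PySem.List.dedup w.toList).foldl (fun d c => d.insert c (d.getD c 0 + 1)) d

def find_letters_alt (words : List String) : List String :=
  let dt := pvB_find words
  let ok := dt.2.all (fun w => !(w.toList.contains dt.1) || w.toList.count dt.1 == 2)
  let counts := words.foldl pvB_countStep PySem.Dict.empty
  let res : List Char := (if ok then [dt.1] else []) ++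
      counts.keys.filter (fun c => counts.getD c 0 == (words.length : Int))
  (PySem.List.sorted res (fun c => c) false).map (fun c => String.ofList [c])

-- ===== PRECONDITION & SPEC =====
def Spec_find_letters (words : List String) (out : List String) : Prop := out = find_letters_alt words
instance (words : List String) (out : List String) : Decidable (Spec_find_letters words out) := by unfold Spec_find_letters; infer_instance

-- ===== CLAIM (what is proved, stated in full; the proofs are below) =====
def Claim_equal_find_letters : Prop := ∀ (words : List String), Dom_find_letters words → Spec_find_letters words (find_letters words)

-- ===== LEMMAS AND PROOFS =====

-- proof-side views of A's per-word update, split into (double_letter, double_checker) and letters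
def pvF (wl : List Char) (a c : Char) : Char := if wl.count c == 2 && a == ' ' then c else a

def pvDlStep (wl : List Char) (dl : Char) : Char := wl.foldl (pvF wl) dl

def pvG (p : Char × Int) (word : String) : Char × Int :=
  let wl := word.toList
  (pvDlStep wl p.1,
   if wl.contains p.1 || p.1 == ' ' then
     if wl.count p.1 == 2 || p.1 == ' ' then p.2 * 1 else p.2 * 0
   else p.2)

def pvL (S : PySem.Set Char) (w : String) : PySem.Set Char := w.toList.foldl PySem.Set.add S

lemma pv_split (ws : List String) : ∀ dl dc S,
    ws.foldl pvA_step (dl, dc, S)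
      = ((ws.foldl pvG (dl, dc)).1, (ws.foldl pvG (dl, dc)).2, ws.foldl pvL S) := by
  induction ws with
  | nil => intro dl dc S; rfl
  | cons w ws ih =>
    intro dl dc S
    have h : pvA_step (dl, dc, S) w = ((pvG (dl, dc) w).1, (pvG (dl, dc) w).2, pvL S w) := by
      simp only [pvA_step, pvG, pvL]
      rw [PySem.List.foldl_prod_mk
        (f := fun a c => if w.toList.count c == 2 && a == ' ' then c else a)
        (g := fun s c => PySem.Set.add s c)]
      rfl
    simp only [List.foldl_cons, h, ih]

lemma pvF_stick (wl : List Char) (a c : Char) (h : a ≠ ' ') : pvF wl a c = a := by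
  have : (a == ' ') = false := by simpa using h
  simp [pvF, this]

lemma pv_stick (wl : List Char) : ∀ (l : List Char) (a : Char), a ≠ ' ' →
    l.foldl (pvF wl) a = a := by
  intro l
  induction l with
  | nil => intro a _; rfl
  | cons c t ih =>
    intro a ha
    rw [List.foldl_cons, pvF_stick wl a c ha]
    exact ih a ha

lemma pvF_hit (wl : List Char) (c : Char) (h : wl.count c = 2) : pvF wl ' ' c = c := by
  simp [pvF, h]

lemma pvF_miss (wl : List Char) (c : Char) (h : wl.count c ≠ 2) : pvF wl ' ' c = ' ' := by
  have : (wl.count c == 2) = false := by simpa using h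
  simp [pvF, this]

lemma pv_first_nonspace (wl : List Char) : ∀ l c, pvB_firstDouble wl l = some c → c ≠ ' ' := by
  intro l
  induction l with
  | nil => intro c h; simp [pvB_firstDouble] at h
  | cons x t ih =>
    intro c h
    simp only [pvB_firstDouble] at h
    split at h
    · rename_i hcond
      cases h
      intro hsp
      subst hsp
      simp at hcond
    · exact ih c h

lemma pv_search (wl : List Char) : ∀ l,
    l.foldl (pvF wl) ' ' = (pvB_firstDouble wl l).getD ' ' := by
  intro l
  induction l with
  | nil => rfl
  | cons c t ih =>
    by_cases h2 : wl.count c = 2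
    · by_cases hsp : c = ' '
      · subst hsp
        rw [List.foldl_cons, pvF_hit wl ' ' h2, ih]
        simp [pvB_firstDouble]
      · rw [List.foldl_cons, pvF_hit wl c h2, pv_stick wl t c hsp]
        simp [pvB_firstDouble, h2, hsp]
    · rw [List.foldl_cons, pvF_miss wl c h2, ih]
      have : (wl.count c == 2) = false := by simpa using h2
      simp [pvB_firstDouble, this]

lemma pv_checkfold (ws : List String) : ∀ dl dc, dl ≠ ' ' →
    ws.foldl pvG (dl, dc)
      = (dl, if ws.all (fun w => !(w.toList.contains dl) || w.toList.count dl == 2) then dc else 0) := by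
  induction ws with
  | nil => intro dl dc _; rfl
  | cons w ws ih =>
    intro dl dc hdl
    have hstick : pvDlStep w.toList dl = dl := pv_stick w.toList w.toList dl hdl
    have hne : (dl == ' ') = false := by simpa using hdl
    simp only [List.foldl_cons, pvG, hstick, hne, Bool.or_false, List.all_cons]
    by_cases hc : w.toList.contains dl = true
    · by_cases h2 : (w.toList.count dl == 2) = true
      · rw [if_pos (by simp only [hc, Bool.true_or]), if_pos (by simp only [h2, Bool.true_or]),
          mul_one, ih dl dc hdl]
        have hchk : (!w.toList.contains dl || w.toList.count dl == 2) = true := by simp [h2]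
        simp only [hchk, Bool.true_and]
      · have h2f : (w.toList.count dl == 2) = false := by simpa using h2
        rw [if_pos (by simp only [hc, Bool.true_or]), if_neg (by simp [h2f, hne]), mul_zero,
          ih dl 0 hdl]
        have hmem : dl ∈ w.toList := by simpa using hc
        have hchk : (!w.toList.contains dl || w.toList.count dl == 2) = false := by
          simp only [hc, Bool.not_true, h2f, Bool.false_or]
        simp only [hchk, Bool.false_and, Bool.false_eq_true, if_false]
        split <;> rfl
    · have hcf : w.toList.contains dl = false := by simpa using hc
      rw [if_neg (by simp only [hcf, hne, Bool.or_false, Bool.false_eq_true, not_false_eq_true]),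
        ih dl dc hdl]
      have hchk : (!w.toList.contains dl || w.toList.count dl == 2) = true := by
        simp only [hcf, Bool.not_false, Bool.true_or]
      simp only [hchk, Bool.true_and]

lemma pv_phase1 (ws : List String) : ∀ dc,
    ws.foldl pvG (' ', dc)
      = ((pvB_find ws).1,
         if (pvB_find ws).2.all
              (fun w => !(w.toList.contains (pvB_find ws).1) || w.toList.count (pvB_find ws).1 == 2)
            then dc else 0) := by
  induction ws with
  | nil => intro dc; rfl
  | cons w ws ih =>
    intro dc
    have hg : pvG (' ', dc) w = (pvDlStep w.toList ' ', dc) := by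
      simp [pvG, mul_one]
    have hsearch : pvDlStep w.toList ' ' = (pvB_firstDouble w.toList w.toList).getD ' ' :=
      pv_search w.toList w.toList
    cases hfd : pvB_firstDouble w.toList w.toList with
    | some c =>
      have hcne : c ≠ ' ' := pv_first_nonspace w.toList w.toList c hfd
      simp only [List.foldl_cons, hg, hsearch, hfd, Option.getD_some, pvB_find]
      rw [pv_checkfold ws c dc hcne]
    | none =>
      simp only [List.foldl_cons, hg, hsearch, hfd, Option.getD_none, pvB_find]
      exact ih dc

lemma pv_check_true (ws : List String) (c : Char) :
    pvA_check c ws true = ws.all (fun w => w.toList.contains c) := by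
  induction ws with
  | nil => rfl
  | cons w ws ih =>
    simp only [pvA_check, List.all_cons]
    by_cases h : w.toList.contains c = true
    · rw [if_pos h, ih, h, Bool.true_and]
    · have hf : w.toList.contains c = false := by simpa using h
      rw [if_neg h, hf, Bool.false_and]

lemma pv_check_any (w : String) (ws : List String) (c : Char) (lc : Bool) :
    pvA_check c (w :: ws) lc = (w :: ws).all (fun w => w.toList.contains c) := by
  simp only [pvA_check, List.all_cons]
  by_cases h : w.toList.contains c = true
  · rw [if_pos h, pv_check_true, h, Bool.true_and]
  · have hf : w.toList.contains c = false := by simpa using h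
    rw [if_neg h, hf, Bool.false_and]

-- set(…).update with a deduplicated argument is update with the raw list
lemma pv_update_add (S acc : PySem.Set Char) (c : Char) :
    PySem.Set.update S (PySem.Set.add acc c) = PySem.Set.add (PySem.Set.update S acc) c := by
  by_cases h : c ∈ acc
  · have h1 : PySem.Set.add acc c = acc := by
      simp [PySem.Set.add, PySem.Set.contains, h]
    have h2 : PySem.Set.add (PySem.Set.update S acc) c = PySem.Set.update S acc := by
      have : c ∈ PySem.Set.update S acc := (PySem.Set.mem_update S acc c).mpr (Or.inr h)
      simp [PySem.Set.add, PySem.Set.contains, this]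
    rw [h1, h2]
  · have h1 : PySem.Set.add acc c = acc ++ [c] := by
      simp [PySem.Set.add, PySem.Set.contains, h]
    rw [h1]
    simp [PySem.Set.update, List.foldl_append, PySem.Set.add]

lemma pv_update_foldl_add (t : List Char) : ∀ (acc S : PySem.Set Char),
    PySem.Set.update S (t.foldl PySem.Set.add acc) = PySem.Set.update (PySem.Set.update S acc) t := by
  induction t with
  | nil => intro acc S; rfl
  | cons c t ih =>
    intro acc S
    simp only [PySem.Set.update, List.foldl_cons] at *
    rw [ih (PySem.Set.add acc c) S]
    have h := pv_update_add S acc c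
    simp only [PySem.Set.update] at h
    rw [h]

lemma pv_update_dedup (S : PySem.Set Char) (l : List Char) :
    PySem.Set.update S (PySem.List.dedup l) = PySem.Set.update S l := by
  rw [PySem.List.dedup_eq_ofList, PySem.Set.ofList_eq_foldl]
  have := pv_update_foldl_add l [] S
  simpa [PySem.Set.update] using this

lemma pv_keys (ws : List String) : ∀ (d : PySem.Dict Char Int),
    (ws.foldl pvB_countStep d).keys = ws.foldl pvL d.keys := by
  induction ws with
  | nil => intro d; rfl
  | cons w ws ih =>
    intro d
    simp only [List.foldl_cons, ih]
    have hstep : (pvB_countStep d w).keys = pvL d.keys w := by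
      rw [pvB_countStep, PySem.Dict.keys_foldl_insert]
      rw [pv_update_dedup]
      rfl
    rw [hstep]

lemma pv_count_dedup (l : List Char) (c : Char) :
    List.count c (PySem.List.dedup l) = (if c ∈ l then 1 else 0) := by
  by_cases h : c ∈ l
  · rw [List.count_eq_one_of_mem (by rw [PySem.List.dedup_eq_ofList]; exact PySem.Set.nodup_ofList l)
        ((PySem.List.mem_dedup l c).mpr h)]
    simp [h]
  · rw [List.count_eq_zero_of_not_mem (fun hm => h ((PySem.List.mem_dedup l c).mp hm))]
    simp [h]

lemma pv_getD (ws : List String) : ∀ (d : PySem.Dict Char Int) (c : Char),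
    (ws.foldl pvB_countStep d).getD c 0
      = d.getD c 0 + (ws.countP (fun w => w.toList.contains c) : Int) := by
  induction ws with
  | nil => intro d c; simp
  | cons w ws ih =>
    intro d c
    simp only [List.foldl_cons, ih]
    have hstep : (pvB_countStep d w).getD c 0
        = d.getD c 0 + (List.count c (PySem.List.dedup w.toList) : Int) := by
      rw [pvB_countStep, PySem.Dict.getD_foldl_insert_add_one]
    rw [hstep, pv_count_dedup]
    by_cases h : c ∈ w.toList
    · have : w.toList.contains c = true := by simpa using h
      simp [List.countP_cons, h]
      ring
    · have : w.toList.contains c = false := by simpa using h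
      simp [List.countP_cons, h]

lemma pv_res0 (b : Bool) (dl : Char) :
    (if (if b = true then (1 : Int) else 0) ≠ 0 then [dl] else []) = (if b = true then [dl] else []) := by
  cases b <;> simp

lemma pv_pred (W : List String) (c : Char) :
    ((W.countP (fun w => w.toList.contains c) : Int) == (W.length : Int))
      = W.all (fun w => w.toList.contains c) := by
  cases hall : W.all (fun w => w.toList.contains c) with
  | true =>
    have h1 : W.countP (fun w => w.toList.contains c) = W.length :=
      List.countP_eq_length.mpr (List.all_eq_true.mp hall)
    simp only [h1, beq_self_eq_true]
  | false =>
    have hne : W.countP (fun w => w.toList.contains c) ≠ W.length := by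
      intro he
      rw [List.all_eq_true.mpr (List.countP_eq_length.mp he)] at hall
      cases hall
    have h2 : ¬ ((W.countP (fun w => w.toList.contains c) : Int) = (W.length : Int)) := by
      exact_mod_cast hne
    simp only [beq_eq_false_iff_ne, ne_eq, h2, not_false_eq_true]

-- ===== VERDICT (by name: the statement is the Claim_ definition above) =====
theorem find_letters_spec : Claim_equal_find_letters := by
  unfold Claim_equal_find_letters
  intro words _
  unfold Spec_find_letters
  cases words with
  | nil => rfl
  | cons w ws =>
    simp only [find_letters, find_letters_alt,
      pv_split (w :: ws) ' ' 1 PySem.Set.empty, pv_phase1 (w :: ws) 1]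
    rw [pv_res0]
    rw [PySem.List.foldl_congr_mem (List.foldl pvL PySem.Set.empty (w :: ws)) _
        (fun (q : Bool × List Char) letter =>
          ((w :: ws).all (fun v => v.toList.contains letter),
           if ((w :: ws).all (fun v => v.toList.contains letter)) = true then q.2 ++ [letter] else q.2))
        _
        (by intro q letter _; simp only [pv_check_any])]
    rw [PySem.List.foldl_prod_mk
        (f := fun _ letter => (w :: ws).all (fun v => v.toList.contains letter))
        (g := fun acc letter =>
          if ((w :: ws).all (fun v => v.toList.contains letter)) = true then acc ++ [letter] else acc)]
    rw [pv_keys (w :: ws) PySem.Dict.empty, PySem.Dict.keys_empty]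
    rw [List.filter_congr (l := List.foldl pvL [] (w :: ws)) (by
      intro c _
      rw [pv_getD (w :: ws) PySem.Dict.empty c, PySem.Dict.getD_empty, zero_add, pv_pred])]
    dsimp only
    rw [PySem.List.foldl_append_if_eq_filter]
    rfl
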